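-- pv_equiv track=rewrite | github.com/Parys1/sell-bot | app/bot.py | _select_periodic
-- ===== SOURCE A (Python) =====
-- def _select_periodic(lines: list[int], min_step: int = 38, max_step: int = 90) -> list[int]:
--     if len(lines) < 3:
--         return lines
--     best: list[int] = []
--     for i in range(len(lines)):
--         current = [lines[i]]
--         last = lines[i]
--         for j in range(i + 1, len(lines)):
--             step = lines[j] - last
--             if min_step <= step <= max_step:
--                 current.append(lines[j])
--                 last = lines[j]
--         if len(current) > len(best):
--             best = current
--     return best or lines
-- ===== SOURCE B (Python) =====
-- def _select_periodic(lines: list[int], min_step: int = 38, max_step: int = 90) -> list[int]: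
--     if len(lines) < 3:
--         return lines
--     n = len(lines)
--     # Memoized chains, right to left: the greedy chain starting at i is
--     # lines[i] followed by the (already computed) chain of the first later
--     # index whose value lies in [lines[i]+min_step, lines[i]+max_step].
--     chains = [None] * n
--     for i in range(n - 1, -1, -1):
--         chain = [lines[i]]
--         for j in range(i + 1, n):
--             if min_step <= lines[j] - lines[i] <= max_step:
--                 chain = [lines[i]] + chains[j]
--                 break
--         chains[i] = chain
--     return max(chains, key=len)
-- ===== Notes on version B (the rewrite author's own statement) =====
-- stated objective: alternative
-- what changed: Replaces A's per-start full greedy rescans with a right-to-left memoized DP: each index stores its whole greedy chain (lines[i] prepended to the chain of its first in-window successor, found with an early break), and the answer is max(chains, key=len).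
import Mathlib
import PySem

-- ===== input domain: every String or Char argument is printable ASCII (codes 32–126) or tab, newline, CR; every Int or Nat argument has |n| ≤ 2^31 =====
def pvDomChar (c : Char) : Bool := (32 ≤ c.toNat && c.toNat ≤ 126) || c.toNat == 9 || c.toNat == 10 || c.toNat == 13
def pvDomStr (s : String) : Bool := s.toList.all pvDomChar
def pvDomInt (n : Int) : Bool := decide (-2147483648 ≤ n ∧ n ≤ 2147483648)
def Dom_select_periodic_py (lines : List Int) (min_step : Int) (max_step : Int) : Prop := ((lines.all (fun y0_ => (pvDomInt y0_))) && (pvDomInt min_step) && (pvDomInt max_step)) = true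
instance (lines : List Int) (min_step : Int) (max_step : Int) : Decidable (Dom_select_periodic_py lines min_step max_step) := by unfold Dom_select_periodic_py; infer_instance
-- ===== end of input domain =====

-- B replaces A's per-start greedy rescans by a right-to-left memoized chain table (alternative decomposition; same return value).

-- ===== PORT A =====
-- inner loop of A: for j in range(i+1, n): step = lines[j] - last; append when in window
def pvInnerA (minS maxS : Int) : List Int → List Int → Int → List Int
  | [], cur, _ => cur
  | y :: t, cur, last =>
      if minS ≤ y - last ∧ y - last ≤ maxS then pvInnerA minS maxS t (cur ++ [y]) y
      else pvInnerA minS maxS t cur last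

-- outer loop of A: for i in range(n): build current from lines[i]; keep it if strictly longer
def pvOuterA (minS maxS : Int) : List Int → List Int → List Int
  | best, [] => best
  | best, x :: rest =>
      let current := pvInnerA minS maxS rest [x] x
      pvOuterA minS maxS (if current.length > best.length then current else best) rest

def select_periodic_py (lines : List Int) (min_step : Int) (max_step : Int) : List Int :=
  if lines.length < 3 then lines
  else
    let best := pvOuterA min_step max_step [] lines
    if best = [] then lines else best   -- "return best or lines"

-- ===== PORT B =====
-- B's inner loop: first later line in [x+min_step, x+max_step] → prepend x to its memoized chain (break); else [x]
def pvPickB (minS maxS x : Int) : List (Int × List Int) → List Int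
  | [] => [x]
  | (y, c) :: t => if minS ≤ y - x ∧ y - x ≤ maxS then x :: c else pvPickB minS maxS x t

-- B's table: chains[i], built right to left (the chains of the suffix are computed before index i)
def pvChainsB (minS maxS : Int) : List Int → List (List Int)
  | [] => []
  | x :: rest =>
      let cs := pvChainsB minS maxS rest
      pvPickB minS maxS x (rest.zip cs) :: cs

def select_periodic_py_alt (lines : List Int) (min_step : Int) (max_step : Int) : List Int :=
  if lines.length < 3 then lines
  else
    -- max(chains, key=len); the list is nonempty here, so the default is never used
    (PySem.List.max? (pvChainsB min_step max_step lines) List.length).getD lines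

-- ===== PRECONDITION & SPEC =====
def Spec_select_periodic_py (lines : List Int) (min_step : Int) (max_step : Int) (out : List Int) : Prop := out = select_periodic_py_alt lines min_step max_step
instance (lines : List Int) (min_step : Int) (max_step : Int) (out : List Int) : Decidable (Spec_select_periodic_py lines min_step max_step out) := by unfold Spec_select_periodic_py; infer_instance

-- ===== CLAIM (what is proved, stated in full; the proofs are below) =====
def Claim_equal_select_periodic_py : Prop := ∀ (lines : List Int) (min_step : Int) (max_step : Int), Dom_select_periodic_py lines min_step max_step → Spec_select_periodic_py lines min_step max_step (select_periodic_py lines min_step max_step)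

-- ===== LEMMAS AND PROOFS =====

-- the tail of A's greedy chain: elements appended while scanning t with current last value
def pvScan (minS maxS : Int) : Int → List Int → List Int
  | _, [] => []
  | last, y :: t => if minS ≤ y - last ∧ y - last ≤ maxS then y :: pvScan minS maxS y t else pvScan minS maxS last t

-- the list of greedy chains of all suffixes (reference form shared by both sides)
def pvG (minS maxS : Int) : List Int → List (List Int)
  | [] => []
  | x :: t => (x :: pvScan minS maxS x t) :: pvG minS maxS t

-- "keep the strictly longer" accumulator
def pvUpd (b c : List Int) : List Int := if b.length < c.length then c else b

theorem pvInnerA_eq (minS maxS : Int) : ∀ (t cur : List Int) (last : Int),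
    pvInnerA minS maxS t cur last = cur ++ pvScan minS maxS last t := by
  intro t
  induction t with
  | nil => intro cur last; simp [pvInnerA, pvScan]
  | cons y t ih =>
      intro cur last
      simp only [pvInnerA, pvScan]
      by_cases h : minS ≤ y - last ∧ y - last ≤ maxS
      · simp only [if_pos h, ih]; simp
      · simp only [if_neg h, ih]

theorem pvOuterA_eq (minS maxS : Int) : ∀ (l best : List Int),
    pvOuterA minS maxS best l = List.foldl pvUpd best (pvG minS maxS l) := by
  intro l
  induction l with
  | nil => intro best; simp [pvOuterA, pvG]
  | cons x t ih =>
      intro best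
      simp only [pvOuterA, pvG, List.foldl, pvInnerA_eq, pvUpd]
      rw [ih]
      rfl

theorem pvPickB_eq (minS maxS : Int) : ∀ (t : List Int) (x : Int),
    pvPickB minS maxS x (t.zip (pvG minS maxS t)) = x :: pvScan minS maxS x t := by
  intro t
  induction t with
  | nil => intro x; simp [pvPickB, pvScan]
  | cons y u ih =>
      intro x
      simp only [pvG, List.zip, List.zipWith, pvPickB, pvScan]
      by_cases h : minS ≤ y - x ∧ y - x ≤ maxS
      · simp only [if_pos h]
      · simp only [if_neg h]
        exact ih x

theorem pvChainsB_eq (minS maxS : Int) : ∀ (l : List Int),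
    pvChainsB minS maxS l = pvG minS maxS l := by
  intro l
  induction l with
  | nil => rfl
  | cons x t ih => simp only [pvChainsB, pvG, ih, pvPickB_eq]

theorem pvMax?_eq_foldl (t : List (List Int)) : ∀ (c : List Int),
    PySem.List.max? (c :: t) List.length = some (List.foldl pvUpd c t) := by
  induction t with
  | nil => intro c; rfl
  | cons y u ih =>
      intro c
      have h1 : PySem.List.max? (c :: y :: u) List.length
          = PySem.List.max? (pvUpd c y :: u) List.length := by
        simp only [PySem.List.max?, List.foldl, pvUpd]
        by_cases h : c.length < y.length <;> simp [h]
      rw [h1, ih]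
      simp [List.foldl]

theorem pvFoldl_upd_len (t : List (List Int)) : ∀ (c : List Int),
    c.length ≤ (List.foldl pvUpd c t).length := by
  induction t with
  | nil => intro c; simp
  | cons y u ih =>
      intro c
      simp only [List.foldl, pvUpd]
      by_cases h : c.length < y.length
      · simp only [h, if_pos]
        exact le_trans (le_of_lt h) (ih y)
      · simp only [h, if_neg, not_false_iff]
        exact ih c

theorem select_periodic_py_spec : Claim_equal_select_periodic_py := by
  intro lines minS maxS _
  unfold Spec_select_periodic_py select_periodic_py select_periodic_py_alt
  by_cases hlen : lines.length < 3
  · simp [hlen]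
  · cases lines with
    | nil => simp at hlen
    | cons x t =>
        simp only [hlen, if_neg, not_false_iff]
        rw [pvOuterA_eq, pvChainsB_eq]
        simp only [pvG, List.foldl, pvUpd]
        have h0 : ([] : List Int).length < (x :: pvScan minS maxS x t).length := by simp
        rw [if_pos h0, pvMax?_eq_foldl]
        have hne : List.foldl pvUpd (x :: pvScan minS maxS x t) (pvG minS maxS t) ≠ [] := by
          intro h
          have := pvFoldl_upd_len (pvG minS maxS t) (x :: pvScan minS maxS x t)
          rw [h] at this
          simp at this
        simp [hne]
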